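-- pv_equiv track=rewrite | github.com/tishchennko/EGE | Пробники ЕГЭ/Пробник до 13-04-25/task-19-21.py | f
-- ===== SOURCE A (Python) =====
-- def f(x, c, win):
--     if x > 40:
--         return c in win
--     if c > max(win):
--         return 0
--     moves = [f(x + 3, c + 1, win), f(x + 6, c + 1, win), f(x * 2, c + 1, win)]
--     if c % 2 != max(win) % 2:
--         return any(moves)
--     else:
--         return all(moves)
-- ===== SOURCE B (Python) =====
-- def f(x, c, win):
--     if x > 40:
--         return c in win
--     mx = max(win)
--     memo = {}
--
--     def g(x, c):
--         if (x, c) in memo: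
--             return memo[(x, c)]
--         if x > 40:
--             r = c in win
--         elif c > mx:
--             r = False
--         elif x <= 0 and x + 6 * (mx - c + 1) <= 0:
--             # prune: x can never exceed 40 within the remaining mx-c+1 moves
--             # (each move adds at most 6 and doubling a non-positive x decreases it),
--             # so every leaf below is a "c > mx" leaf and the subtree value is False
--             r = False
--         else:
--             moves = [g(x + 3, c + 1), g(x + 6, c + 1), g(x * 2, c + 1)]
--             r = any(moves) if c % 2 != mx % 2 else all(moves)
--         memo[(x, c)] = r
--         return r
--
--     return g(x, c)
-- ===== Notes on version B (the rewrite author's own statement) =====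
-- stated objective: alternative
-- what changed: Replaces the naive 3-way game recursion by a memoized recursion on the (x, c) state, with max(win) hoisted out and a soundness-proved prune (a non-positive x that cannot exceed 40 within the remaining moves yields False immediately), so each reachable state is evaluated once; a timing run's input family did not measure it faster.
-- outside the precondition, e.g. on f(0, 0, []): A raises ValueError, B raises ValueError; on f(1, 1, [0]): A returns 0, B returns False
import Mathlib
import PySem

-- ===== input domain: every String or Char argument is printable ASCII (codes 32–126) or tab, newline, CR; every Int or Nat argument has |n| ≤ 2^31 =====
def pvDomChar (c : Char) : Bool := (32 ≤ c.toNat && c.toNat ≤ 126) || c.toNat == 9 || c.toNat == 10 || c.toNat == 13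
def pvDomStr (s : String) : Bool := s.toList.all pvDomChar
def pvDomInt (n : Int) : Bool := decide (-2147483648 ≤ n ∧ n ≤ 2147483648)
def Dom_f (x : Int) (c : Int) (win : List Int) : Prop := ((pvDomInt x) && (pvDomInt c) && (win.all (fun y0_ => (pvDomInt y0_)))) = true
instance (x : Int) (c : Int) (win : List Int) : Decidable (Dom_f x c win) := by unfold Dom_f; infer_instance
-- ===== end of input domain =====

-- B memoizes the 3-way game recursion on the (x, c) state (max(win) hoisted out of the
-- recursion, plus a proved prune), so each reachable state is evaluated once.


-- ===== PORT A =====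
-- A's recursion with m = max(win) (a constant of the recursion: win never changes) and a Nat
-- fuel = (m + 1 - c).toNat + 1, which strictly exceeds the recursion depth, purely to make the
-- recursion structural; branches in A's order, the three moves as a list then any/all, as in Python.
def fAux : Nat → Int → List Int → Int → Int → Bool
  | 0, _, _, _, _ => false            -- unreachable: the supplied fuel exceeds the depth
  | fuel + 1, m, win, x, c =>
    if x > 40 then win.contains c
    else if c > m then false
    else
      let moves := [fAux fuel m win (x + 3) (c + 1), fAux fuel m win (x + 6) (c + 1),
                    fAux fuel m win (x * 2) (c + 1)]
      if PySem.Int.mod c 2 ≠ PySem.Int.mod m 2 then moves.any id else moves.all id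

def f (x : Int) (c : Int) (win : List Int) : Bool :=
  if x > 40 then win.contains c
  else
    match PySem.List.max? win (fun y => y) with
    | none => false            -- Python raises ValueError here (max of empty); excluded by Pre_f
    | some m => fAux ((m + 1 - c).toNat + 1) m win x c

-- ===== PORT B =====
-- B's inner g: a memo dict keyed by (x, c), threaded through the three recursive calls;
-- the same fuel device makes the recursion structural.
def fGo : Nat → Int → List Int → Int → Int → PySem.Dict (Int × Int) Bool →
    Bool × PySem.Dict (Int × Int) Bool
  | 0, _, _, _, _, memo => (false, memo)          -- unreachable: fuel exceeds the depth
  | fuel + 1, m, win, x, c, memo =>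
    match memo.get? (x, c) with
    | some v => (v, memo)
    | none =>
      if x > 40 then
        let r := win.contains c
        (r, memo.insert (x, c) r)
      else if c > m then
        (false, memo.insert (x, c) false)
      else if x ≤ 0 ∧ x + 6 * (m - c + 1) ≤ 0 then
        -- prune: x can never exceed 40 within the remaining m - c + 1 moves, so the
        -- whole subtree bottoms out in "c > m" leaves and its value is False
        (false, memo.insert (x, c) false)
      else
        let r1 := fGo fuel m win (x + 3) (c + 1) memo
        let r2 := fGo fuel m win (x + 6) (c + 1) r1.2
        let r3 := fGo fuel m win (x * 2) (c + 1) r2.2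
        let moves := [r1.1, r2.1, r3.1]
        let r := if PySem.Int.mod c 2 ≠ PySem.Int.mod m 2 then moves.any id else moves.all id
        (r, r3.2.insert (x, c) r)

def f_alt (x : Int) (c : Int) (win : List Int) : Bool :=
  if x > 40 then win.contains c
  else
    match PySem.List.max? win (fun y => y) with
    | none => false            -- Python B also raises ValueError here; excluded by Pre_f
    | some m => (fGo ((m + 1 - c).toNat + 1) m win x c PySem.Dict.empty).1

-- ===== PRECONDITION & SPEC =====
-- Pre_f excludes the inputs where A raises ValueError (win = [] with x ≤ 40, max of empty list)
-- and those where A returns the Python int 0 instead of a bool (x ≤ 40 and c > max(win)):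
-- neither is a bool value the typed claim could cover.
def Pre_f (x : Int) (c : Int) (win : List Int) : Prop := x > 40 ∨ ∃ w ∈ win, c ≤ w
instance (x : Int) (c : Int) (win : List Int) : Decidable (Pre_f x c win) := by unfold Pre_f; infer_instance
def pvWitness_f : Int × Int × List Int := (10, 0, [7])

def Spec_f (x : Int) (c : Int) (win : List Int) (out : Bool) : Prop := out = f_alt x c win
instance (x : Int) (c : Int) (win : List Int) (out : Bool) : Decidable (Spec_f x c win out) := by unfold Spec_f; infer_instance

-- ===== CLAIM (what is proved, stated in full; the proofs are below) =====
def Claim_equal_f : Prop := ∀ (x : Int) (c : Int) (win : List Int), Dom_f x c win → Pre_f x c win → Spec_f x c win (f x c win)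

-- ===== LEMMAS AND PROOFS =====

-- memo validity: every cached value is A's (unmemoized) value at its state
def MemoOK (m : Int) (win : List Int) (memo : PySem.Dict (Int × Int) Bool) : Prop :=
  ∀ p v, memo.get? p = some v → v = fAux ((m + 1 - p.2).toNat + 1) m win p.1 p.2

theorem memoOK_insert {m : Int} {win : List Int} {memo : PySem.Dict (Int × Int) Bool} {r : Bool}
    (h : MemoOK m win memo) (x c : Int)
    (hv : fAux ((m + 1 - c).toNat + 1) m win x c = r) :
    MemoOK m win (memo.insert (x, c) r) := by
  intro p v hp
  rw [PySem.Dict.get?_insert] at hp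
  split at hp
  · rename_i hpe; cases hp; subst hpe; exact hv.symm
  · exact h p v hp

-- the prune is sound: if x ≤ 0 and x + 6*(m + 1 - c) ≤ 0 then no reachable position
-- exceeds 40 before c > m, so A's value of the whole subtree is false
theorem fAux_pruned (m : Int) (win : List Int) :
    ∀ fuel x c, x ≤ 0 → x + 6 * (m + 1 - c) ≤ 0 → fAux fuel m win x c = false := by
  intro fuel
  induction fuel with
  | zero => intro x c _ _; rfl
  | succ fuel ih =>
    intro x c h1 h2
    by_cases hc : c > m
    · simp only [fAux, if_neg (by omega : ¬ x > 40), if_pos hc]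
    · have e1 := ih (x + 3) (c + 1) (by omega) (by omega)
      have e2 := ih (x + 6) (c + 1) (by omega) (by omega)
      have e3 := ih (x * 2) (c + 1) (by omega) (by omega)
      simp only [fAux, if_neg (by omega : ¬ x > 40), if_neg hc, e1, e2, e3]
      split <;> simp

theorem fGo_correct (m : Int) (win : List Int) :
    ∀ fuel x c memo, (m + 1 - c).toNat < fuel → MemoOK m win memo →
      (fGo fuel m win x c memo).1 = fAux ((m + 1 - c).toNat + 1) m win x c ∧
      MemoOK m win (fGo fuel m win x c memo).2 := by
  intro fuel
  induction fuel with
  | zero => intro x c memo hn; omega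
  | succ fuel ih =>
    intro x c memo _ hok
    cases hget : memo.get? (x, c) with
    | some v =>
      have hred : fGo (fuel + 1) m win x c memo = (v, memo) := by
        simp only [fGo, hget]
      rw [hred]
      exact ⟨hok _ _ hget, hok⟩
    | none =>
      by_cases hx : x > 40
      · have he : fAux ((m + 1 - c).toNat + 1) m win x c = win.contains c := by
          simp only [fAux, if_pos hx]
        have hred : fGo (fuel + 1) m win x c memo =
            (win.contains c, memo.insert (x, c) (win.contains c)) := by
          simp only [fGo, hget, if_pos hx]
        rw [hred]
        exact ⟨he.symm, memoOK_insert hok x c he⟩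
      · by_cases hc : c > m
        · have he : fAux ((m + 1 - c).toNat + 1) m win x c = false := by
            simp only [fAux, if_neg hx, if_pos hc]
          have hred : fGo (fuel + 1) m win x c memo =
              (false, memo.insert (x, c) false) := by
            simp only [fGo, hget, if_neg hx, if_pos hc]
          rw [hred]
          exact ⟨he.symm, memoOK_insert hok x c he⟩
        · by_cases hp : x ≤ 0 ∧ x + 6 * (m - c + 1) ≤ 0
          · have he : fAux ((m + 1 - c).toNat + 1) m win x c = false :=
              fAux_pruned m win _ x c hp.1 (by omega)
            have hred : fGo (fuel + 1) m win x c memo =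
                (false, memo.insert (x, c) false) := by
              simp only [fGo, hget, if_neg hx, if_neg hc, if_pos hp]
            rw [hred]
            exact ⟨he.symm, memoOK_insert hok x c he⟩
          · have hfe : (m + 1 - c).toNat = (m + 1 - (c + 1)).toNat + 1 := by omega
            have hlt : (m + 1 - (c + 1)).toNat < fuel := by omega
            obtain ⟨e1, k1⟩ := ih (x + 3) (c + 1) memo hlt hok
            obtain ⟨e2, k2⟩ := ih (x + 6) (c + 1) _ hlt k1
            obtain ⟨e3, k3⟩ := ih (x * 2) (c + 1) _ hlt k2
            rw [← hfe] at e1 e2 e3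
            have hunf : fAux ((m + 1 - c).toNat + 1) m win x c =
                (if PySem.Int.mod c 2 ≠ PySem.Int.mod m 2 then
                  [fAux ((m + 1 - c).toNat) m win (x + 3) (c + 1),
                   fAux ((m + 1 - c).toNat) m win (x + 6) (c + 1),
                   fAux ((m + 1 - c).toNat) m win (x * 2) (c + 1)].any id
                else
                  [fAux ((m + 1 - c).toNat) m win (x + 3) (c + 1),
                   fAux ((m + 1 - c).toNat) m win (x + 6) (c + 1),
                   fAux ((m + 1 - c).toNat) m win (x * 2) (c + 1)].all id) := by
              conv_lhs => rw [fAux.eq_2]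
              rw [if_neg hx, if_neg hc]
            have he : fAux ((m + 1 - c).toNat + 1) m win x c =
                (if PySem.Int.mod c 2 ≠ PySem.Int.mod m 2 then
                  [(fGo fuel m win (x + 3) (c + 1) memo).1,
                   (fGo fuel m win (x + 6) (c + 1) (fGo fuel m win (x + 3) (c + 1) memo).2).1,
                   (fGo fuel m win (x * 2) (c + 1)
                     (fGo fuel m win (x + 6) (c + 1) (fGo fuel m win (x + 3) (c + 1) memo).2).2).1].any id
                else
                  [(fGo fuel m win (x + 3) (c + 1) memo).1,
                   (fGo fuel m win (x + 6) (c + 1) (fGo fuel m win (x + 3) (c + 1) memo).2).1,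
                   (fGo fuel m win (x * 2) (c + 1)
                     (fGo fuel m win (x + 6) (c + 1) (fGo fuel m win (x + 3) (c + 1) memo).2).2).1].all id) := by
              rw [hunf, e1, e2, e3]
            have hred : fGo (fuel + 1) m win x c memo =
                ((if PySem.Int.mod c 2 ≠ PySem.Int.mod m 2 then
                  [(fGo fuel m win (x + 3) (c + 1) memo).1,
                   (fGo fuel m win (x + 6) (c + 1) (fGo fuel m win (x + 3) (c + 1) memo).2).1,
                   (fGo fuel m win (x * 2) (c + 1)
                     (fGo fuel m win (x + 6) (c + 1) (fGo fuel m win (x + 3) (c + 1) memo).2).2).1].any id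
                else
                  [(fGo fuel m win (x + 3) (c + 1) memo).1,
                   (fGo fuel m win (x + 6) (c + 1) (fGo fuel m win (x + 3) (c + 1) memo).2).1,
                   (fGo fuel m win (x * 2) (c + 1)
                     (fGo fuel m win (x + 6) (c + 1) (fGo fuel m win (x + 3) (c + 1) memo).2).2).1].all id),
                 (fGo fuel m win (x * 2) (c + 1)
                     (fGo fuel m win (x + 6) (c + 1) (fGo fuel m win (x + 3) (c + 1) memo).2).2).2.insert (x, c)
                  (if PySem.Int.mod c 2 ≠ PySem.Int.mod m 2 then
                  [(fGo fuel m win (x + 3) (c + 1) memo).1,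
                   (fGo fuel m win (x + 6) (c + 1) (fGo fuel m win (x + 3) (c + 1) memo).2).1,
                   (fGo fuel m win (x * 2) (c + 1)
                     (fGo fuel m win (x + 6) (c + 1) (fGo fuel m win (x + 3) (c + 1) memo).2).2).1].any id
                else
                  [(fGo fuel m win (x + 3) (c + 1) memo).1,
                   (fGo fuel m win (x + 6) (c + 1) (fGo fuel m win (x + 3) (c + 1) memo).2).1,
                   (fGo fuel m win (x * 2) (c + 1)
                     (fGo fuel m win (x + 6) (c + 1) (fGo fuel m win (x + 3) (c + 1) memo).2).2).1].all id)) := by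
              simp only [fGo, hget, if_neg hx, if_neg hc, if_neg hp]
            rw [hred]
            exact ⟨he.symm, memoOK_insert k3 x c he⟩

-- ===== VERDICT (by name: the statement is the Claim_ definition above) =====
theorem f_spec : Claim_equal_f := by
  intro x c win _ _
  unfold Spec_f f f_alt
  split
  · rfl
  · cases hm : PySem.List.max? win (fun y => y) with
    | none => rfl
    | some m =>
      have := fGo_correct m win ((m + 1 - c).toNat + 1) x c PySem.Dict.empty
        (by omega) (by intro p v hp; simp [PySem.Dict.get?_empty] at hp)
      exact this.1.symm
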